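-- pv_equiv track=rewrite | github.com/remedic/r-DailyProgrammer | 05202019_easy.py | hh
-- ===== SOURCE A (Python) =====
-- def warmup1(seq):
--     out=[]
--     for value in seq:
--         if value!=0:
--             out.append(value)
--     return(out)
--
-- def warmup2(seq):
--
--     def check_sort(seq):
--         flag=True
--         for i,val in enumerate(seq):
--             if i>0:
--                 if seq[i]>seq[i-1]:
--                     flag=False
--         return(flag)
--
--     def bubble_sort(seq):
--         for i,val in enumerate(seq):
--             if i>0:
--                 if seq[i]>seq[i-1]:
--                     a=seq[i]
--                     b=seq[i-1]
--                     seq[i]=b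
--                     seq[i-1]=a
--         return(seq)
--
--     if check_sort(seq)==True:
--         return(seq)
--     else:
--         seq=bubble_sort(seq)
--         return(warmup2(seq))
--
-- def warmup3(N, seq):
--     if N>len(seq):
--         return(True)
--     else:
--         return(False)
--
-- def warmup4(N, seq):
--     for value in range(0,N):
--         seq[value]=seq[value]-1
--     return(seq)
--
-- def hh(seq):
--     seq = warmup1(seq)
--     if len(seq)==0:
--         return(True)
--     else:
--         seq = warmup2(seq)
--         N = seq[0]
--         seq = seq[1:]
--         if warmup3(N, seq)==True:
--             return(False)
--         else:
--             seq = warmup4(N, seq)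
--             return(hh(seq))
-- ===== SOURCE B (Python) =====
-- def hh(seq):
--     # One initial sort, then each round merge the decremented prefix back in
--     # (O(n) per round) instead of re-running bubble-sort passes to a fixpoint.
--     def merge_desc(a, b):
--         out = []
--         i = j = 0
--         while i < len(a) and j < len(b):
--             if a[i] >= b[j]:
--                 out.append(a[i]); i += 1
--             else:
--                 out.append(b[j]); j += 1
--         out.extend(a[i:])
--         out.extend(b[j:])
--         return out
--
--     l = sorted(seq, reverse=True)
--     while True:
--         l = [x for x in l if x != 0]
--         if not l:
--             return True
--         n, rest = l[0], l[1:]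
--         if n > len(rest):
--             return False
--         if n < 0:
--             # every remaining value is negative: the process only discards
--             # heads from here on and always ends with the empty list
--             return True
--         l = merge_desc([x - 1 for x in rest[:n]], rest[n:])
-- ===== Notes on version B (the rewrite author's own statement) =====
-- stated objective: faster
-- what changed: A re-sorts at every recursion level by running bubble-sort passes to a fixpoint (O(n^2) per level, O(n^3) total); B sorts the sequence once and then keeps it sorted with an O(n) merge of the decremented prefix per round, also short-circuiting once the remaining maximum is negative (where A's process provably always ends True).
import Mathlib
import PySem

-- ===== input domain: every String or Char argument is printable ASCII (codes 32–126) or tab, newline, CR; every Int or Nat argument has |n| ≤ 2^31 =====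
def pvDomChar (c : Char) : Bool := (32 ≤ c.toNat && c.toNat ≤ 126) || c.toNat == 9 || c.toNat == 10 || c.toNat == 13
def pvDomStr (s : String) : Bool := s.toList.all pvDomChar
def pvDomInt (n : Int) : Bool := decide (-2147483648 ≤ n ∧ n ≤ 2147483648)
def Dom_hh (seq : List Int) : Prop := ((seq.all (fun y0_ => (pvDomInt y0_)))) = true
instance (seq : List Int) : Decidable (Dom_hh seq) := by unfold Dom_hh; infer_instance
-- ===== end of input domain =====

-- B replaces A's repeated bubble-sort passes at every recursion level by one initial
-- sort plus an O(n) merge of the decremented prefix per round (measured faster).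

-- ===== PORT A =====
def warmup1 (seq : List Int) : List Int :=
  seq.foldl (fun out value => if value ≠ 0 then out ++ [value] else out) []

def check_sort : List Int → Bool
  | a :: b :: t => if b > a then false else check_sort (b :: t)
  | _ => true

-- one in-place pass of A's bubble_sort, read off the index loop (each swap moves the
-- larger element one slot left; the scan continues past the element just swapped)
def bubble_sort : List Int → List Int
  | a :: b :: t => if b > a then b :: bubble_sort (a :: t) else a :: bubble_sort (b :: t)
  | l => l

-- inversion count: termination measure for warmup2's sort-until-sorted recursion
def invCount : List Int → Nat
  | [] => 0
  | a :: t => t.countP (fun x => a < x) + invCount t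

theorem bubble_perm : ∀ l : List Int, (bubble_sort l).Perm l := by
  intro l
  fun_induction bubble_sort l with
  | case1 a b t h ih => exact (ih.cons b).trans (List.Perm.swap a b t)
  | case2 a b t h ih => exact ih.cons a
  | case3 l h => exact List.Perm.refl l

theorem inv_bubble : ∀ l : List Int,
    invCount (bubble_sort l) ≤ invCount l ∧
      (check_sort l = false → invCount (bubble_sort l) < invCount l) := by
  intro l
  fun_induction bubble_sort l with
  | case1 a b t h ih =>
    have hc : (bubble_sort (a :: t)).countP (fun x => b < x)
        = (a :: t).countP (fun x => b < x) := (bubble_perm (a :: t)).countP_eq _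
    have e1 : invCount (b :: bubble_sort (a :: t))
        = (bubble_sort (a :: t)).countP (fun x => b < x) + invCount (bubble_sort (a :: t)) := rfl
    have e2 : (a :: t).countP (fun x => b < x) = t.countP (fun x => b < x) := by
      simp [show ¬ (b < a) by omega]
    have e3 : invCount (a :: b :: t)
        = t.countP (fun x => a < x) + 1 + (t.countP (fun x => b < x) + invCount t) := by
      simp [invCount, show a < b from h]
    have e4 : invCount (a :: t) = t.countP (fun x => a < x) + invCount t := rfl
    obtain ⟨ih1, -⟩ := ih
    rw [e4] at ih1
    refine ⟨?_, fun _ => ?_⟩ <;> (rw [e1, hc, e2, e3]; omega)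
  | case2 a b t h ih =>
    have hc : (bubble_sort (b :: t)).countP (fun x => a < x)
        = (b :: t).countP (fun x => a < x) := (bubble_perm (b :: t)).countP_eq _
    have e1 : invCount (a :: bubble_sort (b :: t))
        = (bubble_sort (b :: t)).countP (fun x => a < x) + invCount (bubble_sort (b :: t)) := rfl
    have e3 : invCount (a :: b :: t)
        = (b :: t).countP (fun x => a < x) + invCount (b :: t) := rfl
    obtain ⟨ih1, ih2⟩ := ih
    constructor
    · rw [e1, hc, e3]; omega
    · intro hcs
      have hcs' : check_sort (b :: t) = false := by
        simp only [check_sort, if_neg h] at hcs; exact hcs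
      have := ih2 hcs'
      rw [e1, hc, e3]; omega
  | case3 l h =>
    refine ⟨le_rfl, fun hcs => ?_⟩
    exfalso
    match l, h, hcs with
    | [], _, hcs => simp [check_sort] at hcs
    | [a], _, hcs => simp [check_sort] at hcs
    | a :: b :: t, h, _ => exact (h a b t rfl).elim

def warmup2 (seq : List Int) : List Int :=
  if check_sort seq then seq else warmup2 (bubble_sort seq)
termination_by invCount seq
decreasing_by exact (inv_bubble seq).2 (by simpa using ‹¬ check_sort seq = true›)

theorem warmup2_perm : ∀ l : List Int, (warmup2 l).Perm l := by
  intro l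
  fun_induction warmup2 l with
  | case1 l h => exact List.Perm.refl l
  | case2 l h ih => exact ih.trans (bubble_perm l)

def warmup3 (N : Int) (seq : List Int) : Bool := decide ((seq.length : Int) < N)

-- indices produced by range(0,N) are nonnegative, so .toNat is exact here
def warmup4 (N : Int) (seq : List Int) : List Int :=
  (PySem.List.pyRange 0 N 1).foldl
    (fun s value => s.set value.toNat ((s.getD value.toNat 0) - 1)) seq

theorem length_warmup4 (N : Int) (seq : List Int) :
    (warmup4 N seq).length = seq.length := by
  unfold warmup4
  generalize PySem.List.pyRange 0 N 1 = rs
  induction rs generalizing seq with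
  | nil => rfl
  | cons r rs ih => simpa [List.foldl_cons] using ih (seq.set r.toNat ((seq.getD r.toNat 0) - 1))

theorem warmup1_eq (seq : List Int) :
    warmup1 seq = seq.filter (fun x => decide (x ≠ 0)) := by
  unfold warmup1
  simpa using PySem.List.foldl_append_ite_eq_filter (fun x : Int => x ≠ 0) seq []

theorem length_warmup1_le (seq : List Int) : (warmup1 seq).length ≤ seq.length := by
  rw [warmup1_eq]; exact List.length_filter_le _ _

theorem hh_dec (seq : List Int) (h : ¬ (warmup1 seq).length = 0) :
    (warmup4 ((PySem.List.pyGet? (warmup2 (warmup1 seq)) 0).getD 0)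
      (PySem.List.slice (warmup2 (warmup1 seq)) (some 1) none)).length < seq.length := by
  rw [length_warmup4]
  have h2 : (PySem.List.slice (warmup2 (warmup1 seq)) (some 1) none).length
      = (warmup2 (warmup1 seq)).length - 1 := by
    simp [PySem.List.slice_from_one]
  have h3 : (warmup2 (warmup1 seq)).length = (warmup1 seq).length :=
    (warmup2_perm (warmup1 seq)).length_eq
  have h4 := length_warmup1_le seq
  omega

def hh (seq : List Int) : Bool :=
  let s := warmup1 seq
  if s.length = 0 then true
  else
    let t := warmup2 s
    let N := (PySem.List.pyGet? t 0).getD 0      -- seq[0]; t is nonempty here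
    let rest := PySem.List.slice t (some 1) none -- seq[1:]
    if warmup3 N rest then false
    else hh (warmup4 N rest)
termination_by seq.length
decreasing_by exact hh_dec seq (by assumption)

-- ===== PORT B =====
def merge_desc : List Int → List Int → List Int
  | [], b => b
  | a, [] => a
  | a :: as, b :: bs =>
    if a ≥ b then a :: merge_desc as (b :: bs) else b :: merge_desc (a :: as) bs

theorem length_merge_desc : ∀ a b : List Int,
    (merge_desc a b).length = a.length + b.length := by
  intro a b
  fun_induction merge_desc a b <;> simp [*] <;> omega

-- well-founded-recursion plumbing: the filter over an attached list is the plain filter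
theorem filter_attach_unattach (l : List Int) :
    (List.filter (fun (x : {x // x ∈ l}) => decide ((x : Int) ≠ 0)) l.attach).unattach
      = l.filter (fun x => decide (x ≠ 0)) := by
  rw [List.filter_attach l (fun y => decide (y ≠ 0))]
  rw [List.unattach, List.map_map]
  simp [Function.comp_def, Subtype.map]

theorem hhGo_dec (l f' : List Int) (hf : f' = l.filter (fun x => decide (x ≠ 0)))
    (hne : ¬ f'.length = 0) (n : Int) :
    (merge_desc (((PySem.List.slice f' (some 1) none).take n.toNat).map (fun x => x - 1))
      ((PySem.List.slice f' (some 1) none).drop n.toNat)).length < l.length := by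
  rw [length_merge_desc]
  have h2 : (PySem.List.slice f' (some 1) none).length = f'.length - 1 := by
    simp [PySem.List.slice_from_one]
  have h3 : f'.length ≤ l.length := by
    rw [hf]; exact List.length_filter_le _ _
  simp only [List.length_map, List.length_take, List.length_drop, h2]
  omega

-- the loop body of B's 'while True'; in the recursive call 0 ≤ n ≤ len(rest), so
-- .toNat take/drop are exactly the slices rest[:n] / rest[n:]
def hhGo (l : List Int) : Bool :=
  let f := l.filter (fun x => decide (x ≠ 0))
  if f.length = 0 then true
  else
    let n := (PySem.List.pyGet? f 0).getD 0
    let rest := PySem.List.slice f (some 1) none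
    if n > (rest.length : Int) then false
    else if n < 0 then true
    else hhGo (merge_desc ((rest.take n.toNat).map (fun x => x - 1)) (rest.drop n.toNat))
termination_by l.length
decreasing_by exact hhGo_dec l _ (filter_attach_unattach l) (by assumption) _

def hh_alt (seq : List Int) : Bool := hhGo (PySem.List.sorted seq (fun x => x) true)

-- ===== PRECONDITION & SPEC =====
def Spec_hh (seq : List Int) (out : Bool) : Prop := out = hh_alt seq
instance (seq : List Int) (out : Bool) : Decidable (Spec_hh seq out) := by unfold Spec_hh; infer_instance

-- ===== CLAIM (what is proved, stated in full; the proofs are below) =====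
def Claim_equal_hh : Prop := ∀ (seq : List Int), Dom_hh seq → Spec_hh seq (hh seq)

-- ===== LEMMAS AND PROOFS =====

theorem check_sort_iff : ∀ l : List Int,
    check_sort l = true ↔ l.Pairwise (fun a b : Int => b ≤ a) := by
  intro l
  fun_induction check_sort l with
  | case1 a b t h =>
    simp only [Bool.false_eq_true, false_iff]
    intro hp
    have := List.rel_of_pairwise_cons hp (List.mem_cons_self)
    omega
  | case2 a b t h ih =>
    rw [ih]
    constructor
    · intro hp
      refine List.pairwise_cons.mpr ⟨?_, hp⟩
      intro x hx
      rcases List.mem_cons.mp hx with rfl | hx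
      · omega
      · have hxb := List.rel_of_pairwise_cons hp hx
        have hba : b ≤ a := by omega
        omega
    · intro hp
      exact (List.pairwise_cons.mp hp).2
  | case3 l h =>
    simp only [true_iff]
    match l, h with
    | [], _ => exact List.Pairwise.nil
    | [a], _ => simp
    | a :: b :: t, h => exact (h a b t rfl).elim

theorem warmup2_sorted : ∀ l : List Int,
    (warmup2 l).Pairwise (fun a b : Int => b ≤ a) := by
  intro l
  fun_induction warmup2 l with
  | case1 l h => exact (check_sort_iff l).mp h
  | case2 l h ih => exact ih

theorem pairwise_ge_unique {l₁ l₂ : List Int} (hp : l₁.Perm l₂)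
    (h₁ : l₁.Pairwise (fun a b : Int => b ≤ a))
    (h₂ : l₂.Pairwise (fun a b : Int => b ≤ a)) : l₁ = l₂ :=
  PySem.List.eq_of_perm_of_pairwise_le_of_injective (fun x : Int => -x) neg_injective hp
    (h₁.imp (fun {a b} h => by dsimp only; omega))
    (h₂.imp (fun {a b} h => by dsimp only; omega))

-- any ≥-sorted rearrangement of xs IS sorted(xs, reverse=True)
theorem sortD_eq {xs m : List Int} (hp : m.Perm xs)
    (hs : m.Pairwise (fun a b : Int => b ≤ a)) :
    PySem.List.sorted xs (fun x => x) true = m :=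
  pairwise_ge_unique ((PySem.List.sorted_perm xs (fun x => x) true).trans hp.symm)
    (PySem.List.sorted_pairwise_rev xs (fun x => x)) hs

theorem merge_desc_perm : ∀ a b : List Int, (merge_desc a b).Perm (a ++ b) := by
  intro a b
  fun_induction merge_desc a b with
  | case1 b => simp
  | case2 a h => simp
  | case3 a as b bs h ih => exact ih.cons a
  | case4 a as b bs h ih =>
    exact (ih.cons b).trans List.perm_middle.symm

theorem merge_desc_sorted : ∀ a b : List Int,
    a.Pairwise (fun x y : Int => y ≤ x) → b.Pairwise (fun x y : Int => y ≤ x) →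
    (merge_desc a b).Pairwise (fun x y : Int => y ≤ x) := by
  intro a b ha hb
  fun_induction merge_desc a b with
  | case1 b => exact hb
  | case2 a h => exact ha
  | case3 a as b bs h ih =>
    refine List.pairwise_cons.mpr ⟨?_, ih (List.pairwise_cons.mp ha).2 hb⟩
    intro x hx
    have hx' : x ∈ as ++ b :: bs := (merge_desc_perm as (b :: bs)).mem_iff.mp hx
    rcases List.mem_append.mp hx' with hx1 | hx2
    · exact (List.pairwise_cons.mp ha).1 x hx1
    · rcases List.mem_cons.mp hx2 with rfl | hx3
      · exact h
      · have := (List.pairwise_cons.mp hb).1 x hx3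
        omega
  | case4 a as b bs h ih =>
    refine List.pairwise_cons.mpr ⟨?_, ih ha (List.pairwise_cons.mp hb).2⟩
    intro x hx
    have hx' : x ∈ (a :: as) ++ bs := (merge_desc_perm (a :: as) bs).mem_iff.mp hx
    rcases List.mem_append.mp hx' with hx1 | hx2
    · rcases List.mem_cons.mp hx1 with rfl | hx3
      · omega
      · have := (List.pairwise_cons.mp ha).1 x hx3
        omega
    · exact (List.pairwise_cons.mp hb).1 x hx2

theorem warmup4_neg (N : Int) (seq : List Int) (h : N ≤ 0) : warmup4 N seq = seq := by
  unfold warmup4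
  rw [PySem.List.pyRange_one_eq_nil h]
  rfl

theorem warmup4_getElem (seq : List Int) : ∀ (k : Nat), k ≤ seq.length →
    ∀ (j : Nat), (hj : j < seq.length) →
    (warmup4 (k : Int) seq)[j]'(by rw [length_warmup4]; exact hj)
      = if j < k then seq[j] - 1 else seq[j] := by
  intro k
  induction k with
  | zero =>
    intro _ j hj
    rw [Nat.cast_zero]
    simp [warmup4_neg 0 seq le_rfl]
  | succ k ih =>
    intro hk j hj
    have hk' : (k : Nat) ≤ seq.length := Nat.le_of_succ_le hk
    have hkl : k < seq.length := hk
    have hstep : warmup4 ((k + 1 : Nat) : Int) seq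
        = (warmup4 (k : Int) seq).set k ((warmup4 (k : Int) seq).getD k 0 - 1) := by
      unfold warmup4
      rw [show ((k + 1 : Nat) : Int) = (k : Int) + 1 by push_cast; ring,
        PySem.List.pyRange_one_succ_right (by positivity), List.foldl_append]
      simp [Int.toNat_natCast]
    have hgd : (warmup4 (k : Int) seq).getD k 0 = seq[k] := by
      rw [List.getD_eq_getElem?_getD,
        List.getElem?_eq_getElem (by rw [length_warmup4]; omega),
        Option.getD_some, ih hk' k hkl, if_neg (lt_irrefl k)]
    simp only [hstep, List.getElem_set]
    by_cases hjk : k = j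
    · subst hjk
      rw [if_pos rfl, hgd, if_pos (Nat.lt_succ_self k)]
    · rw [if_neg hjk, ih hk' j hj]
      rcases Nat.lt_or_ge j k with hlt | hge
      · rw [if_pos hlt, if_pos (by omega)]
      · rw [if_neg (by omega), if_neg (by omega)]

theorem warmup4_spec (n : Int) (seq : List Int) (h0 : 0 ≤ n) (hl : n ≤ (seq.length : Int)) :
    warmup4 n seq = (seq.take n.toNat).map (fun x => x - 1) ++ seq.drop n.toNat := by
  obtain ⟨m, rfl⟩ : ∃ m : Nat, n = (m : Int) := ⟨n.toNat, (Int.toNat_of_nonneg h0).symm⟩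
  have hle : m ≤ seq.length := by exact_mod_cast hl
  rw [Int.toNat_natCast]
  apply List.ext_getElem
  · simp [length_warmup4, List.length_take, List.length_drop]
    omega
  · intro j hj1 hj2
    have hj : j < seq.length := by rwa [length_warmup4] at hj1
    rw [warmup4_getElem seq m hle j hj]
    by_cases hjn : j < m
    · rw [List.getElem_append_left (by simp; omega)]
      simp [List.getElem_take, hjn]
    · rw [List.getElem_append_right (by simp; omega)]
      simp only [List.length_map, List.length_take, List.getElem_drop]
      rw [if_neg hjn]
      congr 1
      omega

-- once every remaining value is negative A's process just discards heads and ends True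
theorem hh_allneg : ∀ (fuel : Nat) (l : List Int), l.length ≤ fuel →
    (∀ x ∈ l, x < 0) → hh l = true := by
  intro fuel
  induction fuel with
  | zero =>
    intro l hl _
    have : l = [] := List.length_eq_zero_iff.mp (Nat.le_zero.mp hl)
    subst this
    rw [hh.eq_def]
    dsimp only
    simp [warmup1]
  | succ fuel ih =>
    intro l hl hneg
    rw [hh.eq_def]
    dsimp only
    have hw1 : warmup1 l = l := by
      rw [warmup1_eq]
      apply List.filter_eq_self.mpr
      intro x hx
      have := hneg x hx
      simp; omega
    rw [hw1]
    by_cases hnil : l.length = 0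
    · simp [hnil]
    · rw [if_neg hnil]
      obtain ⟨c, rest, hcr⟩ : ∃ c rest, warmup2 l = c :: rest := by
        have : (warmup2 l).length = l.length := (warmup2_perm l).length_eq
        cases hwl : warmup2 l with
        | nil => rw [hwl] at this; simp at this; omega
        | cons c rest => exact ⟨c, rest, rfl⟩
      rw [hcr]
      have hcneg : c < 0 := hneg c ((warmup2_perm l).mem_iff.mp (hcr ▸ List.mem_cons_self))
      have hrest : PySem.List.slice (c :: rest) (some 1) none = rest := by
        simp [PySem.List.slice_from_one]
      rw [hrest]
      have hw3 : warmup3 ((PySem.List.pyGet? (c :: rest) 0).getD 0) rest = false := by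
        simp only [PySem.List.pyGet?_zero_cons, Option.getD_some, warmup3]
        simp only [decide_eq_false_iff_not, not_lt]
        have : (0 : Int) ≤ (rest.length : Int) := by positivity
        omega
      rw [hw3]
      simp only [Bool.false_eq_true, if_neg (by simp : ¬False)]
      simp only [PySem.List.pyGet?_zero_cons, Option.getD_some]
      rw [warmup4_neg c rest (le_of_lt hcneg)]
      apply ih rest
      · have : (warmup2 l).length = l.length := (warmup2_perm l).length_eq
        rw [hcr] at this
        simp at this
        omega
      · intro x hx
        exact hneg x ((warmup2_perm l).mem_iff.mp (hcr ▸ List.mem_cons_of_mem c hx))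

theorem hh_eq_go : ∀ (fuel : Nat) (l : List Int), l.length ≤ fuel →
    hh l = hhGo (PySem.List.sorted l (fun x => x) true) := by
  intro fuel
  induction fuel with
  | zero =>
    intro l hl
    have hnil : l = [] := List.length_eq_zero_iff.mp (Nat.le_zero.mp hl)
    subst hnil
    rw [hh.eq_def, hhGo.eq_def]
    dsimp only
    simp [warmup1]
  | succ fuel ih =>
    intro l hl
    have hw1 : warmup1 l = l.filter (fun x => decide (x ≠ 0)) := warmup1_eq l
    have hkey : (PySem.List.sorted l (fun x => x) true).filter (fun x => decide (x ≠ 0))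
        = warmup2 (warmup1 l) := by
      apply pairwise_ge_unique
      · exact ((PySem.List.sorted_perm l (fun x => x) true).filter _).trans
          (((warmup2_perm (warmup1 l)).trans (by rw [hw1])).symm)
      · exact (PySem.List.sorted_pairwise_rev l (fun x => x)).filter _
      · exact warmup2_sorted (warmup1 l)
    rw [hh.eq_def, hhGo.eq_def]
    dsimp only
    rw [hkey]
    have hlen2 : (warmup2 (warmup1 l)).length = (warmup1 l).length := (warmup2_perm _).length_eq
    by_cases hz : (warmup1 l).length = 0
    · have hzB : (warmup2 (warmup1 l)).length = 0 := by omega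
      rw [if_pos hz, if_pos hzB]
    · have hzB : ¬ ((warmup2 (warmup1 l)).length = 0) := by omega
      rw [if_neg hz, if_neg hzB]
      obtain ⟨c, rest, hcr⟩ : ∃ c rest, warmup2 (warmup1 l) = c :: rest := by
        cases hwl : warmup2 (warmup1 l) with
        | nil => rw [hwl] at hlen2; simp at hlen2; omega
        | cons c rest => exact ⟨c, rest, rfl⟩
      rw [hcr]
      simp only [PySem.List.pyGet?_zero_cons, Option.getD_some,
        PySem.List.slice_from_one, List.tail_cons]
      have hsort : (c :: rest).Pairwise (fun a b : Int => b ≤ a) := by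
        rw [← hcr]; exact warmup2_sorted (warmup1 l)
      have hrlen : rest.length ≤ fuel := by
        have := length_warmup1_le l
        rw [hcr] at hlen2; simp at hlen2; omega
      by_cases hbig : (rest.length : Int) < c
      · have hA : warmup3 c rest = true := by simp only [warmup3, decide_eq_true_eq]; exact hbig
        rw [if_pos hA, if_pos hbig]
      · have hA : ¬ (warmup3 c rest = true) := by simp only [warmup3, decide_eq_true_eq]; exact hbig
        rw [if_neg hA, if_neg hbig]
        by_cases hneg : c < 0
        · rw [if_pos hneg, warmup4_neg c rest (le_of_lt hneg)]
          have hrneg : ∀ x ∈ rest, x < 0 := fun x hx =>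
            lt_of_le_of_lt ((List.pairwise_cons.mp hsort).1 x hx) hneg
          exact hh_allneg fuel rest hrlen hrneg
        · rw [if_neg hneg]
          have hneg' : 0 ≤ c := by omega
          have hbig' : c ≤ (rest.length : Int) := by omega
          rw [warmup4_spec c rest hneg' hbig']
          have hulen : ((rest.take c.toNat).map (fun x => x - 1) ++ rest.drop c.toNat).length
              ≤ fuel := by
            simp only [List.length_append, List.length_map, List.length_take, List.length_drop]
            omega
          rw [ih _ hulen]
          congr 1
          apply sortD_eq
          · exact merge_desc_perm _ _
          · have hrest : rest.Pairwise (fun a b : Int => b ≤ a) :=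
              (List.pairwise_cons.mp hsort).2
            apply merge_desc_sorted
            · exact List.Pairwise.map _ (fun a b h => by omega)
                (hrest.sublist (List.take_sublist _ _))
            · exact hrest.sublist (List.drop_sublist _ _)

theorem hh_spec' : ∀ (seq : List Int), hh seq = hh_alt seq := by
  intro seq
  exact hh_eq_go seq.length seq le_rfl

-- ===== VERDICT (by name: the statement is the Claim_ definition above) =====
theorem hh_spec : Claim_equal_hh := by
  intro seq _
  exact hh_spec' seq
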